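-- pv_equiv track=rewrite | github.com/Thiago-Pla/TPs-TeoriaDeAlgoritmos20261C | TP1 - Algoritmos Greedy/src/solucion.py | planificar_videos
-- ===== SOURCE A (Python) =====
-- def planificar_videos(videos):
--     videos_ordenados = sorted(videos, key=lambda x: x[1], reverse=True)
--     tiempo_scaloni = 0
--     tiempo_total= 0
--     for s_i, a_i in videos_ordenados:
--         tiempo_scaloni += s_i
--         tiempo_fin_ayudante = tiempo_scaloni + a_i
--         tiempo_total = max(tiempo_fin_ayudante, tiempo_total)
--     return videos_ordenados, tiempo_total
-- ===== SOURCE B (Python) =====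
-- def planificar_videos(videos):
--     videos_ordenados = sorted(videos, key=lambda x: x[1], reverse=True)
--     # Back-to-front recurrence: the latest assistant finish time of a suffix,
--     # measured from the suffix's start, is m((s,a)::rest) = s + max(a, m(rest)),
--     # with m(empty) = None; the answer is that value clamped at the start time 0.
--     m = None
--     for s_i, a_i in reversed(videos_ordenados):
--         m = s_i + (a_i if m is None else max(a_i, m))
--     return videos_ordenados, (max(m, 0) if m is not None else 0)
-- ===== Notes on version B (the rewrite author's own statement) =====
-- stated objective: alternative
-- what changed: Replaces A's forward pass that threads a running prefix-sum and a running max of finish times by a back-to-front recurrence m((s,a)::rest) = s + max(a, m(rest)) (an Optional accumulator over the reversed list, clamped at 0 once at the end), exploiting distributivity of + over max; no prefix sums or running maximum are maintained.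
import Mathlib
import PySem

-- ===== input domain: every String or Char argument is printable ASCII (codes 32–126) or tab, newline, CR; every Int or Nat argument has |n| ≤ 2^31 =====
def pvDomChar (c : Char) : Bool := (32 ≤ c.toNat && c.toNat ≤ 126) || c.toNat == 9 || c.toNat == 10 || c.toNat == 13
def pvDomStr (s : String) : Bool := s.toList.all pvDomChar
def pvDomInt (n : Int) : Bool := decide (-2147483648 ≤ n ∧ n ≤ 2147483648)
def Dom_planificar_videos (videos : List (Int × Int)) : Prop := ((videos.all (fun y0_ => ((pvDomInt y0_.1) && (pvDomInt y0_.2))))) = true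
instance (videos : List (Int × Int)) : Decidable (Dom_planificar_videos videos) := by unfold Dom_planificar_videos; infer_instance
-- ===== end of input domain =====

-- B computes the total by a back-to-front recurrence m((s,a)::rest) = s + max(a, m(rest)) over the reversed sorted list
-- (Optional accumulator, one final clamp at 0) instead of A's forward pass threading prefix sums and a running max.


-- ===== PORT A =====
def planificar_videos (videos : List (Int × Int)) : (List (Int × Int)) × Int :=
  let ordenados := PySem.List.sorted videos (fun x => x.2) true
  let st := ordenados.foldl (fun (st : Int × Int) p =>
      let tiempo_scaloni := st.1 + p.1
      let tiempo_fin_ayudante := tiempo_scaloni + p.2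
      (tiempo_scaloni, max tiempo_fin_ayudante st.2)) (0, 0)
  (ordenados, st.2)

-- ===== PORT B =====
def planificar_videos_alt (videos : List (Int × Int)) : (List (Int × Int)) × Int :=
  let ordenados := PySem.List.sorted videos (fun x => x.2) true
  let m := ordenados.reverse.foldl (fun (m : Option Int) p =>
      some (p.1 + (match m with | none => p.2 | some t => max p.2 t))) none
  (ordenados, match m with | none => 0 | some t => max t 0)

-- ===== PRECONDITION & SPEC =====
def Spec_planificar_videos (videos : List (Int × Int)) (out : (List (Int × Int)) × Int) : Prop := out = planificar_videos_alt videos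
instance (videos : List (Int × Int)) (out : (List (Int × Int)) × Int) : Decidable (Spec_planificar_videos videos out) := by unfold Spec_planificar_videos; infer_instance

-- ===== CLAIM (what is proved, stated in full; the proofs are below) =====
def Claim_equal_planificar_videos : Prop := ∀ (videos : List (Int × Int)), Dom_planificar_videos videos → Spec_planificar_videos videos (planificar_videos videos)

-- ===== LEMMAS AND PROOFS =====
-- A's forward loop from state (ts, tot) equals B's back-to-front recurrence shifted by ts and maxed with tot.
lemma pv_loop_eq (l : List (Int × Int)) (ts tot : Int) :
    (l.foldl (fun (st : Int × Int) p =>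
      let tiempo_scaloni := st.1 + p.1
      let tiempo_fin_ayudante := tiempo_scaloni + p.2
      (tiempo_scaloni, max tiempo_fin_ayudante st.2)) (ts, tot)).2
    = (match l.foldr (fun p (m : Option Int) =>
          some (p.1 + (match m with | none => p.2 | some t => max p.2 t))) none with
        | none => tot
        | some t => max tot (ts + t)) := by
  induction l generalizing ts tot with
  | nil => simp
  | cons p l ih =>
    simp only [List.foldl_cons, List.foldr_cons]
    rw [ih]
    cases h : l.foldr (fun p (m : Option Int) =>
        some (p.1 + (match m with | none => p.2 | some t => max p.2 t))) none with
    | none => simp; rw [max_comm, add_assoc]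
    | some t =>
      simp only []
      rw [← add_assoc, ← max_add_add_left, max_left_comm, max_assoc]

-- ===== VERDICT (by name: the statement is the Claim_ definition above) =====
theorem planificar_videos_spec : Claim_equal_planificar_videos := by
  intro videos _
  show planificar_videos videos = planificar_videos_alt videos
  simp only [planificar_videos, planificar_videos_alt, List.foldl_reverse]
  congr 1
  rw [pv_loop_eq]
  cases h : (PySem.List.sorted videos (fun x => x.2) true).foldr (fun p (m : Option Int) =>
      some (p.1 + (match m with | none => p.2 | some t => max p.2 t))) none <;> simp [max_comm]
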